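-- pv_equiv track=rewrite | github.com/gaos17/GRU_TCN_HBV_Tank | TANK-model-code/TANK/Tank-A/datadeal.py | count_divided
-- ===== SOURCE A (Python) =====
-- def count_divided(files):#此函数用于事件划分
--     file_count = len(files)
--     part_size = file_count // 5
--     remainder = file_count % 5
--     sizes = [part_size * 3, part_size, part_size]
--     for i in range(remainder):
--         if i == 0:
--             sizes[0] += 1
--         elif i == 1:
--             sizes[1] += 1
--         elif i == 2:
--             sizes[2] += 1
--         elif i == 3:
--             sizes[0] += 1
--         else:
--             sizes[1] += 1
--     start_index = 0
--     index_list = []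
--     for i, size in enumerate(sizes):
--         end_index = start_index + size - 1
--         index_list.extend([start_index, end_index])
--         start_index = end_index + 1
--     # 赋值给指定变量
--     return index_list
-- ===== SOURCE B (Python) =====
-- # Boundary offsets for each remainder r = len % 5: (b0, b1, b2) = (3q+a, 4q+b, 5q+c)
-- _OFF = [(0, 0, 0), (1, 1, 1), (1, 2, 2), (1, 2, 3), (2, 3, 4)]
--
-- def count_divided(files):
--     q, r = divmod(len(files), 5)
--     a, b, c = _OFF[r]
--     b0, b1, b2 = 3 * q + a, 4 * q + b, 5 * q + c
--     return [0, b0 - 1, b0, b1 - 1, b1, b2 - 1]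
-- ===== Notes on version B (the rewrite author's own statement) =====
-- stated objective: simpler
-- what changed: Replaces A's two loops (distributing the remainder into part sizes, then accumulating start/end pairs) with a five-entry lookup table mapping the remainder directly to the three boundary offsets, so each boundary is a closed form 3q+a, 4q+b, 5q+c with no sizes or running index at all.
import Mathlib
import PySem

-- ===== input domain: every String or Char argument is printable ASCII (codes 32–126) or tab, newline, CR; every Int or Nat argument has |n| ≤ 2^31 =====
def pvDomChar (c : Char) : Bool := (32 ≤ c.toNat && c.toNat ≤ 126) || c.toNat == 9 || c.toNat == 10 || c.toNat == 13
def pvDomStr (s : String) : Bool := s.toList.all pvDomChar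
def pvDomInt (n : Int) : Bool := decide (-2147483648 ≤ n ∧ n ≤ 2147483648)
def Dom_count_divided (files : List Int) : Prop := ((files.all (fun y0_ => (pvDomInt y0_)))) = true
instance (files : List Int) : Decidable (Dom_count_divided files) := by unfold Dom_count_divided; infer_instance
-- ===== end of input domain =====

-- ===== PORT A =====
-- B replaces A's remainder-distribution loop and start/end accumulation loop with a
-- five-entry remainder→boundary-offset lookup table; objective: simpler.
def count_divided (files : List Int) : List Int :=
  let file_count : Int := files.length
  let part_size := PySem.Int.floordiv file_count 5
  let remainder := PySem.Int.mod file_count 5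
  let sizes : List Int := [part_size * 3, part_size, part_size]
  let sizes := (PySem.List.pyRange 0 remainder 1).foldl (fun (sz : List Int) i =>
    if i = 0 then sz.set 0 (sz.getD 0 0 + 1)
    else if i = 1 then sz.set 1 (sz.getD 1 0 + 1)
    else if i = 2 then sz.set 2 (sz.getD 2 0 + 1)
    else if i = 3 then sz.set 0 (sz.getD 0 0 + 1)
    else sz.set 1 (sz.getD 1 0 + 1)) sizes
  let res := sizes.foldl (fun (acc : List Int × Int) size =>
      let end_index := acc.2 + size - 1
      (acc.1 ++ [acc.2, end_index], end_index + 1)) ([], 0)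
  res.1

-- ===== PORT B =====
def pvOFF : List (Int × Int × Int) := [(0, 0, 0), (1, 1, 1), (1, 2, 2), (1, 2, 3), (2, 3, 4)]

def count_divided_alt (files : List Int) : List Int :=
  let n : Int := files.length
  let q := PySem.Int.floordiv n 5
  let r := PySem.Int.mod n 5
  let abc := pvOFF.getD r.toNat (0, 0, 0)   -- _OFF[r]; r = len % 5 is always in range 0..4
  let b0 := 3 * q + abc.1
  let b1 := 4 * q + abc.2.1
  let b2 := 5 * q + abc.2.2
  [0, b0 - 1, b0, b1 - 1, b1, b2 - 1]

-- ===== PRECONDITION & SPEC =====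
def Spec_count_divided (files : List Int) (out : List Int) : Prop := out = count_divided_alt files
instance (files : List Int) (out : List Int) : Decidable (Spec_count_divided files out) := by unfold Spec_count_divided; infer_instance

-- ===== CLAIM (what is proved, stated in full; the proofs are below) =====
def Claim_equal_count_divided : Prop := ∀ (files : List Int), Dom_count_divided files → Spec_count_divided files (count_divided files)

-- ===== LEMMAS AND PROOFS =====
lemma count_divided_eq (files : List Int) :
    count_divided files = count_divided_alt files := by
  have hq : PySem.Int.floordiv (files.length : Int) 5 = ((files.length / 5 : Nat) : Int) := by
    exact_mod_cast PySem.Int.floordiv_natCast files.length 5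
  have hr : PySem.Int.mod (files.length : Int) 5 = ((files.length % 5 : Nat) : Int) := by
    exact_mod_cast PySem.Int.mod_natCast files.length 5
  simp only [count_divided, count_divided_alt, hq, hr]
  have h5 : files.length % 5 < 5 := Nat.mod_lt _ (by norm_num)
  generalize files.length / 5 = q
  generalize hR : files.length % 5 = r at h5 ⊢
  interval_cases r <;>
    simp [PySem.List.pyRange_one_cons, PySem.List.pyRange_one_eq_nil, List.foldl, pvOFF] <;>
    and_intros <;> ring

-- ===== VERDICT (by name: the statement is the Claim_ definition above) =====
theorem count_divided_spec : Claim_equal_count_divided := by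
  intro files _
  unfold Spec_count_divided
  exact count_divided_eq files
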